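-- pv_equiv track=rewrite | github.com/rmmajor/informational_theory | lab7/main.py | powers_of_two
-- ===== SOURCE A (Python) =====
-- def powers_of_two(i: int) -> list[int]:
--     powers: list[int] = []
--     power: int = 0
--     while i > 0:
--         if i % 2 == 1:
--             powers.append(2 ** power)
--         power += 1
--         i //= 2
--     powers.reverse()
--
--     return powers
-- ===== SOURCE B (Python) =====
-- def powers_of_two(i: int) -> list[int]:
--     if i <= 0:
--         return []
--     rest = [2 * p for p in powers_of_two(i // 2)]
--     if i % 2 == 1:
--         rest.append(1)
--     return rest
-- ===== Notes on version B (the rewrite author's own statement) =====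
-- stated objective: alternative
-- what changed: Replaced A's iterative LSB-first scan that collects powers then reverses at the end by a structural recursion on the halved argument that doubles the recursive result and appends a unit element for the low bit, producing the descending list directly with no power counter and no reverse.
import Mathlib
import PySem

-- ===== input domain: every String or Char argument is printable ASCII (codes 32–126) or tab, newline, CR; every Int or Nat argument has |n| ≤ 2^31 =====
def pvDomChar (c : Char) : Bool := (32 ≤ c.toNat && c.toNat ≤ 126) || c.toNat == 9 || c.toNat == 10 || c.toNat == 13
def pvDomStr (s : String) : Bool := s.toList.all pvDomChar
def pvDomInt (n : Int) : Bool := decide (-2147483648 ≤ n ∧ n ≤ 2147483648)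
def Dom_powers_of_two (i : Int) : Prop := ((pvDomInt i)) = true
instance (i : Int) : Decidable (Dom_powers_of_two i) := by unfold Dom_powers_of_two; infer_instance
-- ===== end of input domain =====

-- B replaces A's LSB-first loop + reverse by structural recursion on i//2 that doubles
-- the recursive result and appends a unit element for the low bit (objective: alternative).


-- ===== PORT A =====
-- A's while loop: collects 2**power for each set bit, LSB first; 'powers_of_two' reverses at the end.
def powersLoopA (i : Int) (power : Int) : List Int :=
  if h : i > 0 then
    (if PySem.Int.mod i 2 = 1 then [(2 : Int) ^ power.toNat] else [])
      ++ powersLoopA (PySem.Int.floordiv i 2) (power + 1)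
  else []
termination_by i.toNat
decreasing_by
  have h2 : PySem.Int.floordiv i 2 = i / 2 := PySem.Int.floordiv_eq_ediv_of_pos (by omega)
  omega

def powers_of_two (i : Int) : List Int := (powersLoopA i 0).reverse

-- ===== PORT B =====
def powers_of_two_alt (i : Int) : List Int :=
  if h : i ≤ 0 then []
  else
    (powers_of_two_alt (PySem.Int.floordiv i 2)).map (fun p => 2 * p)
      ++ (if PySem.Int.mod i 2 = 1 then [(1 : Int)] else [])
termination_by i.toNat
decreasing_by
  have h2 : PySem.Int.floordiv i 2 = i / 2 := PySem.Int.floordiv_eq_ediv_of_pos (by omega)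
  omega

-- ===== PRECONDITION & SPEC =====
def Spec_powers_of_two (i : Int) (out : List Int) : Prop := out = powers_of_two_alt i
instance (i : Int) (out : List Int) : Decidable (Spec_powers_of_two i out) := by unfold Spec_powers_of_two; infer_instance

-- ===== CLAIM (what is proved, stated in full; the proofs are below) =====
def Claim_equal_powers_of_two : Prop := ∀ (i : Int), Dom_powers_of_two i → Spec_powers_of_two i (powers_of_two i)

-- ===== LEMMAS AND PROOFS =====

-- Loop invariant: A's loop at exponent p, reversed, is B's result scaled by 2^p.
theorem powersLoopA_reverse (n : Nat) (i p : Int) (hn : i.toNat ≤ n) (hp : 0 ≤ p) :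
    (powersLoopA i p).reverse = (powers_of_two_alt i).map (fun x => (2 : Int) ^ p.toNat * x) := by
  induction n generalizing i p with
  | zero =>
      have hi : ¬ i > 0 := by omega
      rw [powersLoopA, powers_of_two_alt]
      simp [hi, show i ≤ 0 by omega]
  | succ n ih =>
      by_cases hi : i > 0
      · have h2 : PySem.Int.floordiv i 2 = i / 2 := PySem.Int.floordiv_eq_ediv_of_pos (by omega)
        have hrec : (powersLoopA (PySem.Int.floordiv i 2) (p + 1)).reverse
            = (powers_of_two_alt (PySem.Int.floordiv i 2)).map
                (fun x => (2 : Int) ^ (p + 1).toNat * x) := by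
          apply ih
          · rw [h2]; omega
          · omega
        rw [powersLoopA, powers_of_two_alt]
        simp only [hi, dif_pos, show ¬ i ≤ 0 by omega, dif_neg, not_false_iff,
          List.reverse_append, hrec, List.map_append, List.map_map]
        have hpow : (p + 1).toNat = p.toNat + 1 := by omega
        congr 1
        · apply List.map_congr_left; intro x _
          simp only [Function.comp, hpow, pow_succ]; ring
        · by_cases hm : i % 2 = 1 <;> simp [hm]
      · have hle : i ≤ 0 := by omega
        rw [powersLoopA, powers_of_two_alt]
        simp [hi, hle]

-- ===== VERDICT (by name: the statement is the Claim_ definition above) =====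
theorem powers_of_two_spec : Claim_equal_powers_of_two := by
  intro i _
  unfold Spec_powers_of_two powers_of_two
  have h := powersLoopA_reverse i.toNat i 0 (le_refl _) (le_refl _)
  simpa using h
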